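-- pv_equiv track=rewrite | github.com/chrisyeh96/climabench | evaluate_per_question.py | create_batches
-- ===== SOURCE A (Python) =====
-- def create_batches(pairs, bs):
--     all_questions = []
--     all_answers = []
--     all_selected_questions = []
--     all_labels = []
--     for i in range(0, len(pairs), bs):
--         selected_questions, questions, answers, labels = list(zip(*pairs[i:i + bs]))
--         all_questions.append(questions)
--         all_answers.append(answers)
--         all_selected_questions.append(selected_questions)
--         all_labels.append(labels)
--     batched_pairs = list(zip(all_selected_questions, all_questions, all_answers, all_labels))
--     return batched_pairs
-- ===== SOURCE B (Python) =====
-- def create_batches(pairs, bs):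
--     if not pairs:
--         return []
--     sel, q, ans, lab = zip(*pairs)
--     out = []
--     for i in range(0, len(pairs), bs):
--         out.append((sel[i:i + bs], q[i:i + bs], ans[i:i + bs], lab[i:i + bs]))
--     return out
-- ===== Notes on version B (the rewrite author's own statement) =====
-- stated objective: simpler
-- what changed: B transposes the whole list once with zip(*pairs) and then slices the four full-length columns per batch, instead of A's per-batch transpose into four parallel accumulator lists followed by a final re-zip.
import Mathlib
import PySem

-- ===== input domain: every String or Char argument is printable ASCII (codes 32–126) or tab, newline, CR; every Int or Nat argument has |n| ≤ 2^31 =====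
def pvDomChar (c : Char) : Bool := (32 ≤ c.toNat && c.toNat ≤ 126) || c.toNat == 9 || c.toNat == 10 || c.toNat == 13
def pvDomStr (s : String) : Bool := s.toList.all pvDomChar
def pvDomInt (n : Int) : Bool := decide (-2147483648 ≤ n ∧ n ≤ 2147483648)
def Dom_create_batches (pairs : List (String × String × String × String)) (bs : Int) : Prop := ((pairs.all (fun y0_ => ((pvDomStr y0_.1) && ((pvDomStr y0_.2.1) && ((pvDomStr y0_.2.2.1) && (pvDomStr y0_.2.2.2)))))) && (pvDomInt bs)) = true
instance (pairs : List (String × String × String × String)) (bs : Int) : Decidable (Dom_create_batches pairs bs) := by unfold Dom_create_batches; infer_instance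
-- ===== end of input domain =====

-- B transposes the whole list once and slices the four columns per batch, instead of
-- A's per-batch transpose into four accumulator lists re-zipped at the end (objective: simpler).


-- ===== PORT A =====
-- zip(*batch): the four columns of a list of 4-tuples (shared by both ports; both Pythons call zip(*…))
def transpose4 (xs : List (String × String × String × String)) :
    List String × List String × List String × List String :=
  (xs.map (·.1), xs.map (·.2.1), xs.map (·.2.2.1), xs.map (·.2.2.2))

-- list(zip(a, b, c, d))
def zip4 : List (List String) → List (List String) → List (List String) → List (List String) →
    List (List String × List String × List String × List String)
  | x :: xs, y :: ys, z :: zs, w :: ws => (x, y, z, w) :: zip4 xs ys zs ws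
  | _, _, _, _ => []

def create_batches (pairs : List (String × String × String × String)) (bs : Int) :
    List (List String × List String × List String × List String) :=
  -- state = (all_questions, all_answers, all_selected_questions, all_labels)
  let st := (PySem.List.pyRange 0 pairs.length bs).foldl
    (fun (acc : List (List String) × List (List String) × List (List String) × List (List String)) i =>
      let t := transpose4 (PySem.List.slice pairs (some i) (some (i + bs)))
      (acc.1 ++ [t.2.1], acc.2.1 ++ [t.2.2.1], acc.2.2.1 ++ [t.1], acc.2.2.2 ++ [t.2.2.2]))
    ([], [], [], [])
  zip4 st.2.2.1 st.1 st.2.1 st.2.2.2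

-- ===== PORT B =====
def create_batches_alt (pairs : List (String × String × String × String)) (bs : Int) :
    List (List String × List String × List String × List String) :=
  match pairs with
  | [] => []
  | _ =>
    let t := transpose4 pairs
    (PySem.List.pyRange 0 pairs.length bs).map (fun i =>
      (PySem.List.slice t.1 (some i) (some (i + bs)),
       PySem.List.slice t.2.1 (some i) (some (i + bs)),
       PySem.List.slice t.2.2.1 (some i) (some (i + bs)),
       PySem.List.slice t.2.2.2 (some i) (some (i + bs))))

-- ===== PRECONDITION & SPEC =====
-- bs = 0 makes range(0, len(pairs), 0) raise ValueError in A (step must not be zero)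
def Pre_create_batches (pairs : List (String × String × String × String)) (bs : Int) : Prop := bs ≠ 0
instance (pairs : List (String × String × String × String)) (bs : Int) : Decidable (Pre_create_batches pairs bs) := by unfold Pre_create_batches; infer_instance
def pvWitness_create_batches : (List (String × String × String × String)) × Int :=
  ([("a", "b", "c", "d"), ("e", "f", "g", "h"), ("i", "j", "k", "l")], 2)

def Spec_create_batches (pairs : List (String × String × String × String)) (bs : Int) (out : List (List String × List String × List String × List String)) : Prop := out = create_batches_alt pairs bs
instance (pairs : List (String × String × String × String)) (bs : Int) (out : List (List String × List String × List String × List String)) : Decidable (Spec_create_batches pairs bs out) := by unfold Spec_create_batches; infer_instance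

-- ===== CLAIM (what is proved, stated in full; the proofs are below) =====
def Claim_equal_create_batches : Prop := ∀ (pairs : List (String × String × String × String)) (bs : Int), Dom_create_batches pairs bs → Pre_create_batches pairs bs → Spec_create_batches pairs bs (create_batches pairs bs)

-- ===== LEMMAS AND PROOFS =====
-- A's four parallel append-accumulators are four maps over the range
theorem foldl4_eq_maps (f1 f2 f3 f4 : Int → List String) (r : List Int)
    (s1 s2 s3 s4 : List (List String)) :
    r.foldl (fun (acc : List (List String) × List (List String) × List (List String) × List (List String)) i =>
        (acc.1 ++ [f1 i], acc.2.1 ++ [f2 i], acc.2.2.1 ++ [f3 i], acc.2.2.2 ++ [f4 i]))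
      (s1, s2, s3, s4)
      = (s1 ++ r.map f1, s2 ++ r.map f2, s3 ++ r.map f3, s4 ++ r.map f4) := by
  induction r generalizing s1 s2 s3 s4 with
  | nil => simp
  | cons a r ih => simp [List.foldl_cons, ih]

-- re-zipping four maps of equal length is one map of the 4-tuple
theorem zip4_map (f1 f2 f3 f4 : Int → List String) (r : List Int) :
    zip4 (r.map f1) (r.map f2) (r.map f3) (r.map f4)
      = r.map (fun i => (f1 i, f2 i, f3 i, f4 i)) := by
  induction r with
  | nil => rfl
  | cons a r ih => simp [List.map_cons, zip4, ih]

-- slicing commutes with mapping a column extractor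
theorem slice_map {α β : Type} (f : α → β) (xs : List α) (a b : Int) :
    PySem.List.slice (xs.map f) (some a) (some b)
      = (PySem.List.slice xs (some a) (some b)).map f := by
  simp [PySem.List.slice, PySem.List.clampIdx, List.map_drop, List.map_take]

-- ===== VERDICT (by name: the statement is the Claim_ definition above) =====
theorem create_batches_spec : Claim_equal_create_batches := by
  intro pairs bs _ hbs
  unfold Spec_create_batches create_batches create_batches_alt
  match pairs with
  | [] =>
    rcases lt_or_gt_of_ne hbs with h | h
    · simp [PySem.List.pyRange, h.ne, zip4]
    · simp [PySem.List.pyRange, h.ne', zip4]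
  | p :: rest =>
    simp only [foldl4_eq_maps, List.nil_append, zip4_map, transpose4, slice_map]
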